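-- pv_equiv track=rewrite | github.com/ItchyMichi/Subtitle-Aligner-GUI | manual/manual_alignment.py | validate_anchors
-- ===== SOURCE A (Python) =====
-- from typing import List, Tuple
--
-- def validate_anchors(
--     anchors: List[Tuple[int, int]]
-- ) -> bool:
--
--     """Check that no ai_index or human_index appears more than once across all anchors."""
--
--     """
--     Check that no ai_index or human_index appears more than once across all anchors.
--     """
--
--     ai_seen = set()
--     human_seen = set()
--     for ai, human in anchors:
--         if ai in ai_seen or human in human_seen:
--             return False
--         ai_seen.add(ai)
--         human_seen.add(human)
--     return True
-- ===== SOURCE B (Python) =====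
-- from typing import List, Tuple
--
-- def _no_adjacent_dup(xs: List[int]) -> bool:
--     return all(x != y for x, y in zip(xs, xs[1:]))
--
-- def validate_anchors(
--     anchors: List[Tuple[int, int]]
-- ) -> bool:
--     """Check that no ai_index or human_index appears more than once across all anchors."""
--     return _no_adjacent_dup(sorted(a for a, _ in anchors)) and \
--            _no_adjacent_dup(sorted(h for _, h in anchors))
-- ===== Notes on version B (the rewrite author's own statement) =====
-- stated objective: alternative
-- what changed: Replaces A's single-pass loop maintaining two seen-sets with early exit by a sort-based algorithm: sort each projected index list and check that no two adjacent sorted elements are equal (duplicates become adjacent after sorting).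
import Mathlib
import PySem

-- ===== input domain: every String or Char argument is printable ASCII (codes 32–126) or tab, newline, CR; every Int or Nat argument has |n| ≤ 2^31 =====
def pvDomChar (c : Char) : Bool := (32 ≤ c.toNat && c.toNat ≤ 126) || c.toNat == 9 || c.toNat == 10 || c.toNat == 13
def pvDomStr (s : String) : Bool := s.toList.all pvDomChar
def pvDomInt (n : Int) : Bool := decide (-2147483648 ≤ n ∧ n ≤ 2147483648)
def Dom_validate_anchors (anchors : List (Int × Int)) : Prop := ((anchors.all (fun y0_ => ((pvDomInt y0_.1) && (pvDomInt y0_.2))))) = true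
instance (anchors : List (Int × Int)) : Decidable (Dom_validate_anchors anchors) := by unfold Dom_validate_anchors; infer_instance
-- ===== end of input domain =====

-- B replaces A's interleaved seen-set loop with a sort-based algorithm: sort each
-- projected index list, then check no two adjacent elements are equal (alternative
-- decomposition; duplicates become adjacent after sorting).

-- ===== PORT A =====
-- the 'for ai, human in anchors' loop with its two seen-sets and early 'return False'
def validateAnchorsLoop (anchors : List (Int × Int))
    (aiSeen humanSeen : PySem.Set Int) : Bool :=
  match anchors with
  | [] => true
  | (ai, human) :: rest =>
    if aiSeen.contains ai || humanSeen.contains human then false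
    else validateAnchorsLoop rest (aiSeen.add ai) (humanSeen.add human)

def validate_anchors (anchors : List (Int × Int)) : Bool :=
  validateAnchorsLoop anchors PySem.Set.empty PySem.Set.empty

-- ===== PORT B =====
-- all(x != y for x, y in zip(xs, xs[1:]))
def noAdjDup (xs : List Int) : Bool :=
  (xs.zip (PySem.List.slice xs (some 1) none)).all (fun p => p.1 != p.2)

def validate_anchors_alt (anchors : List (Int × Int)) : Bool :=
  noAdjDup (PySem.List.sorted (anchors.map Prod.fst) (fun x => x) false)
    && noAdjDup (PySem.List.sorted (anchors.map Prod.snd) (fun x => x) false)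

-- ===== PRECONDITION & SPEC =====
def Spec_validate_anchors (anchors : List (Int × Int)) (out : Bool) : Prop := out = validate_anchors_alt anchors
instance (anchors : List (Int × Int)) (out : Bool) : Decidable (Spec_validate_anchors anchors out) := by unfold Spec_validate_anchors; infer_instance

-- ===== CLAIM (what is proved, stated in full; the proofs are below) =====
def Claim_equal_validate_anchors : Prop := ∀ (anchors : List (Int × Int)), Dom_validate_anchors anchors → Spec_validate_anchors anchors (validate_anchors anchors)

-- ===== LEMMAS AND PROOFS =====

-- the adjacent-pair scan unfolds on two leading elements
theorem noAdjDup_cons_cons (x y : Int) (rest : List Int) :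
    noAdjDup (x :: y :: rest) = ((x != y) && noAdjDup (y :: rest)) := by
  simp [noAdjDup, PySem.List.slice_from_one]

-- on a non-decreasing list, no adjacent duplicates ⟺ no duplicates at all
theorem noAdjDup_iff_nodup (xs : List Int) (h : xs.Pairwise (· ≤ ·)) :
    noAdjDup xs = true ↔ xs.Nodup := by
  induction xs with
  | nil => simp [noAdjDup, PySem.List.slice_from_one]
  | cons x xs ih =>
    cases xs with
    | nil => simp [noAdjDup, PySem.List.slice_from_one]
    | cons y rest =>
      rw [noAdjDup_cons_cons]
      rw [List.pairwise_cons] at h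
      obtain ⟨hx, htail⟩ := h
      rw [Bool.and_eq_true, bne_iff_ne, ih htail]
      simp only [List.nodup_cons, List.mem_cons, not_or]
      constructor
      · rintro ⟨hxy, hymem, hnd⟩
        have hlt : x < y := lt_of_le_of_ne (hx y (by simp)) hxy
        refine ⟨⟨hxy, fun hmem => ?_⟩, hymem, hnd⟩
        have hyx : y ≤ x := (List.pairwise_cons.mp htail).1 x hmem
        omega
      · rintro ⟨⟨hxy, _⟩, hrest⟩
        exact ⟨hxy, hrest⟩

-- B returns true iff both projections are duplicate-free
theorem alt_iff (anchors : List (Int × Int)) :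
    validate_anchors_alt anchors = true ↔
      (anchors.map Prod.fst).Nodup ∧ (anchors.map Prod.snd).Nodup := by
  unfold validate_anchors_alt
  rw [Bool.and_eq_true]
  rw [noAdjDup_iff_nodup _ (PySem.List.sorted_pairwise _ _),
      noAdjDup_iff_nodup _ (PySem.List.sorted_pairwise _ _)]
  rw [(PySem.List.sorted_perm (anchors.map Prod.fst) (fun x => x) false).nodup_iff,
      (PySem.List.sorted_perm (anchors.map Prod.snd) (fun x => x) false).nodup_iff]

-- invariant of A's loop: it returns true iff the seen-sets extended by the
-- respective projections stay duplicate-free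
theorem validateAnchorsLoop_iff (anchors : List (Int × Int))
    (s t : PySem.Set Int) (hs : s.Nodup) (ht : t.Nodup) :
    validateAnchorsLoop anchors s t = true ↔
      (s ++ anchors.map Prod.fst).Nodup ∧ (t ++ anchors.map Prod.snd).Nodup := by
  induction anchors generalizing s t with
  | nil => exact iff_of_true rfl (by simpa using ⟨hs, ht⟩)
  | cons p rest ih =>
    obtain ⟨a, h⟩ := p
    show (if s.contains a || t.contains h then false
          else validateAnchorsLoop rest (s.add a) (t.add h)) = true ↔ _
    by_cases hmem : s.contains a || t.contains h
    · rw [if_pos hmem]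
      rw [Bool.or_eq_true, PySem.Set.contains_iff, PySem.Set.contains_iff] at hmem
      simp only [Bool.false_eq_true, false_iff, not_and]
      rcases hmem with hmem | hmem
      · intro hcon
        rw [List.nodup_append] at hcon
        exact fun _ => (hcon.2.2 a hmem a (by simp)) rfl
      · intro _ hcon
        rw [List.nodup_append] at hcon
        exact (hcon.2.2 h hmem h (by simp)) rfl
    · rw [if_neg hmem]
      rw [Bool.or_eq_true, PySem.Set.contains_iff, PySem.Set.contains_iff, not_or] at hmem
      obtain ⟨ha, hh⟩ := hmem
      rw [ih (s.add a) (t.add h) (PySem.Set.nodup_add s a hs) (PySem.Set.nodup_add t h ht)]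
      rw [PySem.Set.add_of_not_mem ha, PySem.Set.add_of_not_mem hh]
      simp only [List.map_cons, List.append_assoc, List.singleton_append]

-- ===== VERDICT (by name: the statement is the Claim_ definition above) =====
theorem validate_anchors_spec : Claim_equal_validate_anchors := by
  intro anchors _
  unfold Spec_validate_anchors validate_anchors
  rw [show (PySem.Set.empty : PySem.Set Int) = [] from rfl]
  rw [Bool.eq_iff_iff, validateAnchorsLoop_iff anchors [] [] List.nodup_nil List.nodup_nil,
    alt_iff]
  simp only [List.nil_append]
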